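-- pv_equiv track=rewrite | github.com/IFero04/Scraper-DGES | util.py | extract_cursos
-- ===== SOURCE A (Python) =====
-- def extract_cursos(text):
--     have_text = False
--     result = ''
--
--     if text[0] == "L":
--         result += 'L'
--         text = text[1:]
--
--     for i, char in enumerate(text):
--         if char.isdigit() and have_text:
--             if text[i -1] == "L":
--                 result = result[:-1]
--             break
--         if char.isalpha():
--             have_text = True
--         result += char
--     return result.strip()
-- ===== SOURCE B (Python) =====
-- def extract_cursos(text):
--     leading = ''
--     if text[0] == "L":
--         leading = 'L'
--         text = text[1:]
--     a = next((i for i, c in enumerate(text) if c.isalpha()), None)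
--     if a is None:
--         result = leading + text
--     else:
--         b = next((i for i in range(a + 1, len(text)) if text[i].isdigit()), None)
--         if b is None:
--             result = leading + text
--         else:
--             result = leading + text[:b]
--             if text[b - 1] == "L":
--                 result = result[:-1]
--     return result.strip()
-- ===== Notes on version B (the rewrite author's own statement) =====
-- stated objective: alternative
-- what changed: Replaces A's incremental enumerate state machine (have_text flag, char-by-char accumulation, break) with an index-finding decomposition: find the first alphabetic index, then the first digit index after it, and build the result by slicing.
import Mathlib
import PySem

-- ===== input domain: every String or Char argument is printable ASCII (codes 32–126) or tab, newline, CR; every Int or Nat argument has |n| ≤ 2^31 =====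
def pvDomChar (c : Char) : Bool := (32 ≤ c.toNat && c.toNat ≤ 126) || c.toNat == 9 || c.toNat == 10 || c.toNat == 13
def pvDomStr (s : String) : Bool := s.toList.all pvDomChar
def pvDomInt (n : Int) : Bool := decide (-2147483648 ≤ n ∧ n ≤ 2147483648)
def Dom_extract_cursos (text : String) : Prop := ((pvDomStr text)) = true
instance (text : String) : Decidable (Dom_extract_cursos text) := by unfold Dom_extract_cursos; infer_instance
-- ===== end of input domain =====

-- B replaces A's incremental state machine with a find-first-alpha / first-digit-after-it index decomposition and slicing (alternative, same cost).

-- ===== PORT A =====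
-- the for-loop of A: full is the (post-'L') text, rem the suffix still to scan starting at index i
def pvLoopA (full : List Char) : List Char → Nat → Bool → List Char → List Char
  | [], _, _, result => result
  | c :: rest, i, have_text, result =>
    if PySem.Chars.isdigit c && have_text then
      (if PySem.List.pyGet? full ((i : Int) - 1) = some 'L' then result.dropLast else result)
    else
      pvLoopA full rest (i + 1) (have_text || PySem.Chars.isalpha c) (result ++ [c])

def extract_cursos (text : String) : String :=
  let cs := text.toList
  -- text[0] == "L": on empty input Python raises IndexError (excluded by Pre_); text[1:] = drop 1 (exact)
  let result := if PySem.List.pyGet? cs 0 = some 'L' then ['L'] else []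
  let cs' := if PySem.List.pyGet? cs 0 = some 'L' then cs.drop 1 else cs
  String.ofList (PySem.Chars.strip (pvLoopA cs' cs' 0 false result))

-- ===== PORT B =====
def extract_cursos_alt (text : String) : String :=
  let cs := text.toList
  let lead := if PySem.List.pyGet? cs 0 = some 'L' then ['L'] else []
  let cs' := if PySem.List.pyGet? cs 0 = some 'L' then cs.drop 1 else cs
  let result :=
    match cs'.findIdx? (fun c => PySem.Chars.isalpha c) with
    | none => lead ++ cs'
    | some a =>
      match (cs'.drop (a + 1)).findIdx? (fun c => PySem.Chars.isdigit c) with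
      | none => lead ++ cs'
      | some k =>
        let b := a + 1 + k
        let r := lead ++ cs'.take b
        if PySem.List.pyGet? cs' ((b : Int) - 1) = some 'L' then r.dropLast else r
  String.ofList (PySem.Chars.strip result)

-- ===== PRECONDITION & SPEC =====
-- Python A evaluates text[0] and so raises IndexError on the empty string; only that input is excluded.
def Pre_extract_cursos (text : String) : Prop := text ≠ ""
instance (text : String) : Decidable (Pre_extract_cursos text) := by unfold Pre_extract_cursos; infer_instance
def pvWitness_extract_cursos : String := "L123 - Matematica"

def Spec_extract_cursos (text : String) (out : String) : Prop := out = extract_cursos_alt text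
instance (text : String) (out : String) : Decidable (Spec_extract_cursos text out) := by unfold Spec_extract_cursos; infer_instance

-- ===== CLAIM (what is proved, stated in full; the proofs are below) =====
def Claim_equal_extract_cursos : Prop := ∀ (text : String), Dom_extract_cursos text → Pre_extract_cursos text → Spec_extract_cursos text (extract_cursos text)

-- ===== LEMMAS AND PROOFS =====

-- once have_text is true, the loop runs to the first digit, then applies the trailing-'L' drop
theorem pvLoopA_true (full : List Char) (rem : List Char) :
    ∀ (i : Nat) (result : List Char),
      pvLoopA full rem i true result =
        match rem.findIdx? (fun c => PySem.Chars.isdigit c) with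
        | none => result ++ rem
        | some k =>
          if PySem.List.pyGet? full (((i + k : Nat) : Int) - 1) = some 'L' then
            (result ++ rem.take k).dropLast
          else result ++ rem.take k := by
  induction rem with
  | nil => intro i result; simp [pvLoopA]
  | cons c rest ih =>
    intro i result
    by_cases hd : PySem.Chars.isdigit c = true
    · simp [pvLoopA, hd, List.findIdx?_cons]
    · rw [Bool.not_eq_true] at hd
      simp only [pvLoopA, hd, Bool.false_and, Bool.false_eq_true, if_false, Bool.true_or,
        List.findIdx?_cons]
      rw [ih (i + 1) (result ++ [c])]
      cases h : rest.findIdx? (fun c => PySem.Chars.isdigit c) with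
      | none => simp
      | some k =>
        have e : ((i : Int) + 1) + k - 1 = (i : Int) + (k + 1) - 1 := by ring
        simp only [Option.map_some]
        push_cast
        rw [e]
        simp

theorem pvLoopA_false (full : List Char) (rem : List Char) :
    ∀ (i : Nat) (result : List Char),
      pvLoopA full rem i false result =
        match rem.findIdx? (fun c => PySem.Chars.isalpha c) with
        | none => result ++ rem
        | some a => pvLoopA full (rem.drop (a + 1)) (i + a + 1) true (result ++ rem.take (a + 1)) := by
  induction rem with
  | nil => intro i result; simp [pvLoopA]
  | cons c rest ih =>
    intro i result
    by_cases ha : PySem.Chars.isalpha c = true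
    · simp [pvLoopA, ha, List.findIdx?_cons]
    · rw [Bool.not_eq_true] at ha
      simp only [pvLoopA, ha, Bool.and_false, Bool.false_eq_true, if_false, Bool.false_or,
        List.findIdx?_cons]
      rw [ih (i + 1) (result ++ [c])]
      cases h : rest.findIdx? (fun c => PySem.Chars.isalpha c) with
      | none => simp
      | some a =>
        have h1 : i + 1 + a + 1 = i + (a + 1) + 1 := by omega
        simp [h1, List.take_succ_cons]

-- the whole loop from the initial state equals B's slicing computation
theorem pvLoop_eq (cs' lead : List Char) :
    pvLoopA cs' cs' 0 false lead =
      match cs'.findIdx? (fun c => PySem.Chars.isalpha c) with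
      | none => lead ++ cs'
      | some a =>
        match (cs'.drop (a + 1)).findIdx? (fun c => PySem.Chars.isdigit c) with
        | none => lead ++ cs'
        | some k =>
          let b := a + 1 + k
          let r := lead ++ cs'.take b
          if PySem.List.pyGet? cs' ((b : Int) - 1) = some 'L' then r.dropLast else r := by
  rw [pvLoopA_false]
  cases h1 : cs'.findIdx? (fun c => PySem.Chars.isalpha c) with
  | none => rfl
  | some a =>
    dsimp only
    rw [pvLoopA_true]
    cases h2 : (cs'.drop (a + 1)).findIdx? (fun c => PySem.Chars.isdigit c) with
    | none => simp
    | some k =>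
      have htake : cs'.take (a + 1 + k) = cs'.take (a + 1) ++ (cs'.drop (a + 1)).take k := by
        rw [← List.take_add]
      simp only [Nat.zero_add, htake, List.append_assoc]

-- ===== VERDICT (by name: the statement is the Claim_ definition above) =====
theorem extract_cursos_spec : Claim_equal_extract_cursos := by
  intro text _ _
  unfold Spec_extract_cursos extract_cursos extract_cursos_alt
  simp only []
  rw [pvLoop_eq]
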